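-- pv_equiv track=rewrite | github.com/ackerr/Algorithms | 1470.shuffle_the_array/solution.py | generic_template
-- ===== SOURCE A (Python) =====
-- def generic_template(nums, n):
--     """ 如果给定数值长度不定 """
--     ans = []
--     length = len(nums)
--     for i in range(n):
--         index = i
--         while index < length:
--             ans.append(nums[index])
--             index += n
--     return ans
-- ===== SOURCE B (Python) =====
-- def generic_template(nums, n):
--     if n <= 0:
--         return []
--     buckets = {}
--     for i, v in enumerate(nums):
--         buckets.setdefault(i % n, []).append(v)
--     ans = []
--     for i in range(n):
--         ans += buckets.get(i, [])
--     return ans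
-- ===== Notes on version B (the rewrite author's own statement) =====
-- stated objective: alternative
-- what changed: Replaced A's n strided passes (inner while jumping by n per outer column) with one sequential enumerate pass that routes each element into a bucket keyed by index % n, then concatenates the buckets in order.
import Mathlib
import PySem

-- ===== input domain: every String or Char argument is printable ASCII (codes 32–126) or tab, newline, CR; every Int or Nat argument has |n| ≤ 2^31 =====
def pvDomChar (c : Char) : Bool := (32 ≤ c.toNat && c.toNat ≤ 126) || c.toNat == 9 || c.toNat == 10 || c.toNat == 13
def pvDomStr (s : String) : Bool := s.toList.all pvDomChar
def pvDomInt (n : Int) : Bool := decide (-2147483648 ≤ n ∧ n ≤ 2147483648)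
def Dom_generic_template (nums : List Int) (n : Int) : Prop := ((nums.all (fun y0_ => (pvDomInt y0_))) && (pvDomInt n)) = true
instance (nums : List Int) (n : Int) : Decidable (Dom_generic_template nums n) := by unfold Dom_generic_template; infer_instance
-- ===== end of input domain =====

-- B replaces A's n strided passes with one bucketing pass over enumerate(nums) (alternative decomposition, same cost).

-- ===== PORT A =====
-- A's inner 'while index < length' loop; fuel only makes it total (every entered iteration
-- comes from 'for i in range(n)' with n ≥ 1 and 0 ≤ index, so nums.length + 1 fuel always suffices)
def pvWhileA (fuel : Nat) (nums : List Int) (n : Int) (length : Int) (index : Int) (ans : List Int) : List Int :=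
  match fuel with
  | 0 => ans
  | f + 1 =>
    if index < length then
      pvWhileA f nums n length (index + n) (ans ++ [PySem.List.pyGetD nums index 0])
    else ans

def generic_template (nums : List Int) (n : Int) : List Int :=
  (PySem.List.pyRange 0 n 1).foldl
    (fun ans i => pvWhileA (nums.length + 1) nums n (nums.length : Int) i ans) []

-- ===== PORT B =====
-- 'buckets.setdefault(i % n, []).append(v)' = Dict.modify (i % n) [] (· ++ [v]);
-- then 'ans += buckets.get(i, [])' for i in range(n)
def generic_template_alt (nums : List Int) (n : Int) : List Int :=
  if n ≤ 0 then []
  else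
    (PySem.List.pyRange 0 n 1).foldl
      (fun ans i => ans ++
        ((PySem.List.enumerate nums).foldl
          (fun d p => d.modify (PySem.Int.mod p.1 n) [] (fun b => b ++ [p.2]))
          (PySem.Dict.empty : PySem.Dict Int (List Int))).getD i []) []

-- ===== PRECONDITION & SPEC =====
def Spec_generic_template (nums : List Int) (n : Int) (out : List Int) : Prop := out = generic_template_alt nums n
instance (nums : List Int) (n : Int) (out : List Int) : Decidable (Spec_generic_template nums n out) := by unfold Spec_generic_template; infer_instance

-- ===== CLAIM (what is proved, stated in full; the proofs are below) =====
def Claim_equal_generic_template : Prop := ∀ (nums : List Int) (n : Int), Dom_generic_template nums n → Spec_generic_template nums n (generic_template nums n)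

-- ===== LEMMAS AND PROOFS =====

-- the elements of nums sitting at indices ≡ i (mod n), in index order
def pvCol (nums : List Int) (n : Int) (i : Int) : List Int :=
  ((PySem.List.enumerate nums).filter (fun p => p.1 % n == i)).map (fun p => p.2)

-- pulling the first surviving pair (index idx) out of the residue-class filter
theorem pv_filt_cons (n : Int) (hn : 1 ≤ n) :
    ∀ (nums : List Int) (s idx : Int), 0 ≤ s → s ≤ idx → idx < s + nums.length →
    (PySem.List.enumerate nums s).filter
        (fun p => decide (idx ≤ p.1) && decide (p.1 % n = idx % n))
      = (idx, nums.getD (idx - s).toNat 0) ::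
        (PySem.List.enumerate nums s).filter
          (fun p => decide (idx + n ≤ p.1) && decide (p.1 % n = idx % n)) := by
  intro nums
  induction nums with
  | nil => intro s idx h0 h1 h2; simp at h2; omega
  | cons x xs ih =>
    intro s idx h0 h1 h2
    rw [PySem.List.enumerate_cons]
    by_cases hs : s = idx
    · subst hs
      rw [List.filter_cons_of_pos (by simp), List.filter_cons_of_neg (by simp; omega)]
      have hval : (x :: xs).getD (s - s).toNat 0 = x := by simp
      rw [hval]
      congr 1
      apply List.filter_congr
      intro p hp
      rw [PySem.List.mem_enumerate_iff] at hp
      obtain ⟨k, hk, rfl⟩ := hp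
      simp only
      by_cases hres : (s + 1 + (k : Int)) % n = s % n
      · have hdvd : n ∣ s + 1 + (k : Int) - s := Int.ModEq.dvd (Int.ModEq.symm hres)
        have hle : n ≤ s + 1 + (k : Int) - s := Int.le_of_dvd (by omega) hdvd
        rw [decide_eq_true (by omega : s ≤ s + 1 + (k : Int)),
            decide_eq_true (by omega : s + n ≤ s + 1 + (k : Int))]
      · simp [hres]
    · have hslt : s < idx := by omega
      rw [List.filter_cons_of_neg (by simp; omega), List.filter_cons_of_neg (by simp; omega)]
      have hrec := ih (s + 1) idx (by omega) (by omega) (by simp at h2 ⊢; omega)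
      rw [hrec]
      congr 2
      have hidx : (idx - s).toNat = (idx - (s + 1)).toNat + 1 := by omega
      rw [hidx, List.getD_cons_succ]

-- A's inner while-loop collects exactly the elements at indices ≥ idx in idx's residue class
theorem pv_whileA_eq (nums : List Int) (n : Int) (hn : 1 ≤ n) :
    ∀ (fuel : Nat) (idx : Int) (acc : List Int), 0 ≤ idx → nums.length ≤ fuel + idx.toNat →
    pvWhileA fuel nums n (nums.length : Int) idx acc
      = acc ++ ((PySem.List.enumerate nums).filter
          (fun p => decide (idx ≤ p.1) && decide (p.1 % n = idx % n))).map (fun p => p.2) := by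
  intro fuel
  induction fuel with
  | zero =>
    intro idx acc h0 hf
    rw [pvWhileA]
    have hnil : (PySem.List.enumerate nums).filter
        (fun p => decide (idx ≤ p.1) && decide (p.1 % n = idx % n)) = [] := by
      rw [List.filter_eq_nil_iff]
      intro p hp
      rw [PySem.List.mem_enumerate_iff] at hp
      obtain ⟨k, hk, rfl⟩ := hp
      simp only [Bool.and_eq_true, decide_eq_true_eq, not_and]
      intro h
      omega
    rw [hnil]; simp
  | succ f ih =>
    intro idx acc h0 hf
    rw [pvWhileA]
    by_cases hidx : idx < (nums.length : Int)
    · rw [if_pos hidx]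
      rw [ih (idx + n) (acc ++ [PySem.List.pyGetD nums idx 0]) (by omega) (by omega)]
      have hcons := pv_filt_cons n hn nums 0 idx (by omega) h0 (by omega)
      have hmod : ∀ p : Int × Int, (decide (idx + n ≤ p.1) && decide (p.1 % n = (idx + n) % n))
          = (decide (idx + n ≤ p.1) && decide (p.1 % n = idx % n)) := by
        intro p; rw [Int.add_emod_right]
      simp only [hmod]
      rw [hcons]
      rw [PySem.List.pyGetD_eq_getElem nums 0 h0 hidx,
          List.getD_eq_getElem?_getD, List.getElem?_eq_getElem (by omega), Option.getD_some]
      simp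
    · rw [if_neg hidx]
      have hnil : (PySem.List.enumerate nums).filter
          (fun p => decide (idx ≤ p.1) && decide (p.1 % n = idx % n)) = [] := by
        rw [List.filter_eq_nil_iff]
        intro p hp
        rw [PySem.List.mem_enumerate_iff] at hp
        obtain ⟨k, hk, rfl⟩ := hp
        simp only [Bool.and_eq_true, decide_eq_true_eq, not_and]
        intro h
        omega
      rw [hnil]; simp

-- for 0 ≤ i < n the 'idx ≤ index' guard is redundant: A's column i is the residue class of i
theorem pv_colA_eq (nums : List Int) (n : Int) (i : Int) (h0 : 0 ≤ i) (hi : i < n) :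
    ((PySem.List.enumerate nums).filter
        (fun p => decide (i ≤ p.1) && decide (p.1 % n = i % n))).map (fun p => p.2)
      = pvCol nums n i := by
  unfold pvCol
  congr 1
  apply List.filter_congr
  intro p hp
  rw [PySem.List.mem_enumerate_iff] at hp
  obtain ⟨k, hk, rfl⟩ := hp
  simp only [zero_add]
  rw [Int.emod_eq_of_lt h0 hi]
  by_cases hres : ((k : Int)) % n = i
  · have hik : i ≤ (k : Int) := by
      by_cases hlt : (k : Int) < n
      · rw [Int.emod_eq_of_lt (by omega) hlt] at hres; omega
      · omega
    simp [hres, hik]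
  · simp [hres]

-- invariant of B's bucketing fold: bucket c holds the residue-class-c elements seen so far
theorem pv_group (n : Int) :
    ∀ (l : List (Int × Int)) (d : PySem.Dict Int (List Int)) (c : Int),
    (l.foldl (fun d p => d.modify (PySem.Int.mod p.1 n) [] (fun b => b ++ [p.2])) d).getD c []
      = d.getD c [] ++ (l.filter (fun p => PySem.Int.mod p.1 n == c)).map (fun p => p.2) := by
  intro l
  induction l with
  | nil => intro d c; simp
  | cons p l ih =>
    intro d c
    rw [List.foldl_cons, ih, PySem.Dict.getD_modify]
    by_cases hc : PySem.Int.mod p.1 n = c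
    · rw [if_pos hc.symm]
      simp [hc]
    · rw [if_neg (fun h : c = PySem.Int.mod p.1 n => hc h.symm)]
      simp [hc]

theorem pv_bucket_eq (nums : List Int) (n : Int) (hn : 0 < n) (i : Int) :
    ((PySem.List.enumerate nums).foldl
        (fun d p => d.modify (PySem.Int.mod p.1 n) [] (fun b => b ++ [p.2]))
        (PySem.Dict.empty : PySem.Dict Int (List Int))).getD i []
      = pvCol nums n i := by
  rw [pv_group]
  simp only [PySem.Int.mod_eq_emod_of_pos hn]
  unfold pvCol
  simp

-- ===== VERDICT (by name: the statement is the Claim_ definition above) =====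
theorem generic_template_spec : Claim_equal_generic_template := by
  intro nums n _
  unfold Spec_generic_template generic_template generic_template_alt
  by_cases hn : n ≤ 0
  · simp [PySem.List.pyRange_one_eq_nil hn, hn]
  · rw [if_neg hn]
    have hA := PySem.List.foldl_congr_mem (PySem.List.pyRange 0 n 1)
      (fun ans i => pvWhileA (nums.length + 1) nums n (nums.length : Int) i ans)
      (fun ans i => ans ++ pvCol nums n i) []
      (by
        intro acc i hi
        rw [PySem.List.mem_pyRange_one] at hi
        show pvWhileA (nums.length + 1) nums n (nums.length : Int) i acc = acc ++ pvCol nums n i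
        rw [pv_whileA_eq nums n (by omega) _ i acc hi.1 (by omega),
            pv_colA_eq nums n i hi.1 hi.2])
    have hB := PySem.List.foldl_congr_mem (PySem.List.pyRange 0 n 1)
      (fun ans i => ans ++
        ((PySem.List.enumerate nums).foldl
          (fun d p => d.modify (PySem.Int.mod p.1 n) [] (fun b => b ++ [p.2]))
          (PySem.Dict.empty : PySem.Dict Int (List Int))).getD i [])
      (fun ans i => ans ++ pvCol nums n i) []
      (by
        intro acc i _
        show acc ++ _ = acc ++ pvCol nums n i
        rw [pv_bucket_eq nums n (by omega) i])
    rw [hA, hB]
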